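-- pv_equiv track=rewrite | github.com/mihirbpi/Advent-of-Code-2020 | adv20/adv20-2.py | roughness
-- ===== SOURCE A (Python) =====
-- def valid_sea_monster(i, j, image):
--     b1 = image[i][j + 18] == "#"
--     b2 = image[i + 1][j] == "#" and image[i + 1][j + 5] == "#" and image[i + 1][j + 6] == "#"
--     b3 = image[i + 1][j + 11] == "#" and image[i + 1][j + 12] == "#" and image[i + 1][j + 17] == "#"
--     b4 = image[i + 1][j + 18] == "#" and image[i + 1][j + 19] == "#" and image[i + 2][j + 1] == "#"
--     b5 = image[i + 2][j + 4] == "#" and image[i + 2][j + 7] == "#" and image[i + 2][j + 10] == "#"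
--     b6 = image[i + 2][j + 13] == "#" and image[i + 2][j + 16] == "#"
--
--     return b1 and b2 and b3 and b4 and b5 and b6
--
-- def is_sea_monster(i, j, image):
--
--     if(i >= len(image) or j >= len(image[0]) or i + 2 >= len(image) or j + 19 >= len(image[0])):
--         return False
--
--     else:
--         return valid_sea_monster(i, j, image)
--
-- def num_sea_monsters(image):
--
--     count = 0
--
--     for i in range(0, len(image)):
--
--         for j in range(0, len(image[0])):
--
--             if(is_sea_monster(i, j, image)):
--                 count += 1
--
--     return count
--
-- def roughness(image):
--     num_sea_mons = num_sea_monsters(image)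
--     hash_count = 0
--
--     for i in range(0, len(image)):
--
--         for j in range(0, len(image[0])):
--
--             if(image[i][j] == "#"):
--                 hash_count += 1
--
--     return hash_count - 15 * num_sea_mons
-- ===== SOURCE B (Python) =====
-- MONSTER = [(0, 18),
--            (1, 0), (1, 5), (1, 6), (1, 11), (1, 12), (1, 17), (1, 18), (1, 19),
--            (2, 1), (2, 4), (2, 7), (2, 10), (2, 13), (2, 16)]
--
--
-- def roughness(image):
--     n = len(image)
--     w = len(image[0])
--     cells = set()
--     for r in range(n):
--         for c in range(w):
--             if image[r][c] == "#":
--                 cells.add((r, c))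
--     # a monster anchor is a point lying in ALL 15 shifted copies of the point set
--     anchors = {(r - MONSTER[0][0], c - MONSTER[0][1]) for (r, c) in cells}
--     for dr, dc in MONSTER[1:]:
--         anchors &= {(r - dr, c - dc) for (r, c) in cells}
--     monsters = sum(1 for (i, j) in anchors
--                    if 0 <= i <= n - 3 and 0 <= j <= w - 20)
--     return len(cells) - 15 * monsters
-- ===== Notes on version B (the rewrite author's own statement) =====
-- stated objective: faster
-- what changed: B converts the image once into a set of '#' coordinates and detects monsters by set algebra -- intersecting the 15 shifted copies of the point set -- instead of A's per-anchor nested scan with fifteen hardcoded cell tests across three helpers; the hash count is len(cells) rather than a second double loop. Pre_ excludes ragged images with a row shorter than the first (A raises IndexError) and the empty image, where A's empty loops return 0 before touching image[0] while B's up-front len(image[0]) raises.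
-- outside the precondition, e.g. on roughness([]): A returns 0, B raises IndexError
import Mathlib
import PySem

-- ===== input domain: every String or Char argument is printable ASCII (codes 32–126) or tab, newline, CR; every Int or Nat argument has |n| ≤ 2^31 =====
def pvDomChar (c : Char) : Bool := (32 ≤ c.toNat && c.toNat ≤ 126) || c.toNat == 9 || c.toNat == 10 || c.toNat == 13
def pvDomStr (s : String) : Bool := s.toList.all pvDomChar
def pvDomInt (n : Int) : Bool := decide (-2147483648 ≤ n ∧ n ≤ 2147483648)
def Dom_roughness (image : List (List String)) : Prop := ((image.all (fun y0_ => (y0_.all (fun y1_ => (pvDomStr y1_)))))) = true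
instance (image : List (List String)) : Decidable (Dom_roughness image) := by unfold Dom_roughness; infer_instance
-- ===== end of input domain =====

-- B detects monsters by set algebra on a once-built point set of '#' coordinates
-- (intersection of its 15 shifted copies) instead of A's per-anchor nested scan with
-- fifteen hardcoded cell tests (objective: faster by a constant factor -- the timing
-- run measured it -- since per-anchor work is replaced by per-'#' set operations).

-- shared cell accessor: image[i][j] for nonnegative in-range indices; exact when the
-- indices are in range, which Pre_roughness guarantees for every access both programs make
def pvGet (image : List (List String)) (i j : Nat) : String :=
  (image.getD i []).getD j ""

-- ===== PORT A =====
def validSeaMonster (i j : Nat) (image : List (List String)) : Bool :=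
  let b1 := pvGet image i (j + 18) == "#"
  let b2 := (pvGet image (i+1) j == "#") && (pvGet image (i+1) (j+5) == "#") && (pvGet image (i+1) (j+6) == "#")
  let b3 := (pvGet image (i+1) (j+11) == "#") && (pvGet image (i+1) (j+12) == "#") && (pvGet image (i+1) (j+17) == "#")
  let b4 := (pvGet image (i+1) (j+18) == "#") && (pvGet image (i+1) (j+19) == "#") && (pvGet image (i+2) (j+1) == "#")
  let b5 := (pvGet image (i+2) (j+4) == "#") && (pvGet image (i+2) (j+7) == "#") && (pvGet image (i+2) (j+10) == "#")
  let b6 := (pvGet image (i+2) (j+13) == "#") && (pvGet image (i+2) (j+16) == "#")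
  b1 && b2 && b3 && b4 && b5 && b6

def isSeaMonster (i j : Nat) (image : List (List String)) : Bool :=
  if i ≥ image.length ∨ j ≥ (image.getD 0 []).length ∨
     i + 2 ≥ image.length ∨ j + 19 ≥ (image.getD 0 []).length then
    false
  else
    validSeaMonster i j image

def numSeaMonsters (image : List (List String)) : Int :=
  (List.range image.length).foldl (fun count i =>
    (List.range (image.getD 0 []).length).foldl (fun count j =>
      if isSeaMonster i j image then count + 1 else count) count) 0

def roughness (image : List (List String)) : Int :=
  let numSeaMons := numSeaMonsters image
  let hashCount :=
    (List.range image.length).foldl (fun h i =>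
      (List.range (image.getD 0 []).length).foldl (fun h j =>
        if pvGet image i j == "#" then h + 1 else h) h) 0
  hashCount - 15 * numSeaMons

-- ===== PORT B =====
def pvMonster : List (Int × Int) :=
  [(0, 18),
   (1, 0), (1, 5), (1, 6), (1, 11), (1, 12), (1, 17), (1, 18), (1, 19),
   (2, 1), (2, 4), (2, 7), (2, 10), (2, 13), (2, 16)]

-- the point set of '#' coordinates (Python: loop building cells)
def pvCells (image : List (List String)) : PySem.Set (Int × Int) :=
  (List.range image.length).foldl (fun s r =>
    (List.range (image.getD 0 []).length).foldl (fun s c =>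
      if pvGet image r c == "#" then PySem.Set.add s ((r : Int), (c : Int)) else s) s)
    PySem.Set.empty

-- {(r - dr, c - dc) for (r, c) in cells}
def pvShift (cells : PySem.Set (Int × Int)) (d : Int × Int) : PySem.Set (Int × Int) :=
  PySem.Set.ofList (cells.map (fun p => (p.1 - d.1, p.2 - d.2)))

def roughness_alt (image : List (List String)) : Int :=
  let n := image.length
  let w := (image.getD 0 []).length
  let cells := pvCells image
  let anchors := (pvMonster.drop 1).foldl (fun a d => PySem.Set.inter a (pvShift cells d))
    (pvShift cells (pvMonster.headD (0, 0)))
  let monsters : Int := anchors.foldl (fun m p =>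
    if 0 ≤ p.1 ∧ p.1 ≤ (n : Int) - 3 ∧ 0 ≤ p.2 ∧ p.2 ≤ (w : Int) - 20 then m + 1 else m) 0
  (PySem.Set.len cells : Int) - 15 * monsters

-- ===== PRECONDITION & SPEC =====
-- Pre_ excludes ragged images with a row shorter than the first row (A raises IndexError)
-- and the empty image, where A's empty loops return 0 before touching image[0] while B's
-- up-front width lookup len(image[0]) raises IndexError.
def Pre_roughness (image : List (List String)) : Prop :=
  image ≠ [] ∧ ∀ row ∈ image, (image.getD 0 []).length ≤ row.length
instance (image : List (List String)) : Decidable (Pre_roughness image) := by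
  unfold Pre_roughness; infer_instance

def pvWitness_roughness : List (List String) := [["#", "."], [".", "#"]]

def Spec_roughness (image : List (List String)) (out : Int) : Prop := out = roughness_alt image
instance (image : List (List String)) (out : Int) : Decidable (Spec_roughness image out) := by unfold Spec_roughness; infer_instance

-- ===== CLAIM (what is proved, stated in full; the proofs are below) =====
def Claim_equal_roughness : Prop := ∀ (image : List (List String)), Dom_roughness image → Pre_roughness image → Spec_roughness image (roughness image)

-- ===== LEMMAS AND PROOFS =====

-- abbreviations used throughout the proofs
-- pvW/pvN: the grid bounds both programs use
-- pvRow image i: the '#' cells of row i (first pvW columns) as Int pairs, in column order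

def pvRow (image : List (List String)) (i : Nat) : List (Int × Int) :=
  ((List.range (image.getD 0 []).length).filter (fun j => pvGet image i j == "#")).map
    (fun (j : Nat) => ((i : Int), (j : Int)))

theorem mem_pvRow (image : List (List String)) (i : Nat) (p : Int × Int) :
    p ∈ pvRow image i ↔ ∃ j < (image.getD 0 []).length, p = ((i : Int), (j : Int)) ∧ pvGet image i j == "#" := by
  simp only [pvRow, List.mem_map, List.mem_filter, List.mem_range]
  constructor
  · rintro ⟨j, ⟨hj, hp⟩, rfl⟩; exact ⟨j, hj, rfl, hp⟩
  · rintro ⟨j, hj, rfl, hp⟩; exact ⟨j, ⟨hj, hp⟩, rfl⟩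

theorem nodup_pvRow (image : List (List String)) (i : Nat) : (pvRow image i).Nodup := by
  refine List.Nodup.map ?_ (List.Nodup.filter _ List.nodup_range)
  intro a b h
  simpa using congrArg Prod.snd h

theorem fst_of_mem_pvRow (image : List (List String)) (i : Nat) (p : Int × Int)
    (h : p ∈ pvRow image i) : p.1 = (i : Int) := by
  rcases (mem_pvRow image i p).mp h with ⟨j, _, rfl, _⟩; rfl

-- the cells-building loop produces exactly the rows, concatenated
theorem foldl_rows (image : List (List String)) :
    ∀ (I : List Nat) (s : List (Int × Int)), I.Nodup → s.Nodup →
    (∀ p ∈ s, ∀ i ∈ I, p.1 ≠ (i : Int)) →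
    I.foldl (fun s r =>
      (List.range (image.getD 0 []).length).foldl (fun s c =>
        if pvGet image r c == "#" then PySem.Set.add s ((r : Int), (c : Int)) else s) s) s
      = s ++ I.flatMap (pvRow image) := by
  intro I
  induction I with
  | nil => intro s _ _ _; simp
  | cons i I ih =>
    intro s hI hs hfst
    have hstep :
        (List.range (image.getD 0 []).length).foldl (fun s c =>
          if pvGet image i c == "#" then PySem.Set.add s ((i : Int), (c : Int)) else s) s
          = s ++ pvRow image i := by
      rw [PySem.List.foldl_if_eq_foldl_filter (p := fun c => pvGet image i c == "#")
        (f := fun s c => PySem.Set.add s ((i : Int), (c : Int)))]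
      rw [← PySem.Set.update_map_eq_foldl_add]
      exact PySem.Set.update_eq_append_of_disjoint s _ (nodup_pvRow image i)
        (fun x hx hxs => hfst x hxs i (List.mem_cons_self ..) (fst_of_mem_pvRow image i x hx))
    rw [List.foldl_cons, hstep, ih (s ++ pvRow image i)]
    · simp
    · exact hI.of_cons
    · refine List.Nodup.append hs (nodup_pvRow image i) ?_
      intro x hx hx'
      exact hfst x hx i (List.mem_cons_self ..) (fst_of_mem_pvRow image i x hx')
    · intro p hp i' hi'
      rcases List.mem_append.mp hp with hp | hp
      · exact hfst p hp i' (List.mem_cons_of_mem _ hi')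
      · rw [fst_of_mem_pvRow image i p hp]
        have : i ≠ i' := fun h => (List.nodup_cons.mp hI).1 (h ▸ hi')
        exact fun h => this (by exact_mod_cast h)

theorem pvCells_eq (image : List (List String)) :
    pvCells image = (List.range image.length).flatMap (pvRow image) := by
  have := foldl_rows image (List.range image.length) [] List.nodup_range List.nodup_nil
    (by intro p hp; simp at hp)
  simpa [pvCells, PySem.Set.empty] using this

theorem mem_pvCells (image : List (List String)) (a b : Int) :
    (a, b) ∈ pvCells image ↔
      0 ≤ a ∧ a < (image.length : Int) ∧ 0 ≤ b ∧ b < ((image.getD 0 []).length : Int) ∧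
        pvGet image a.toNat b.toNat == "#" := by
  rw [pvCells_eq, List.mem_flatMap]
  constructor
  · rintro ⟨i, hi, hp⟩
    rcases (mem_pvRow image i _).mp hp with ⟨j, hj, hpair, hhash⟩
    have h1 : a = (i : Int) := congrArg Prod.fst hpair
    have h2 : b = (j : Int) := congrArg Prod.snd hpair
    rw [List.mem_range] at hi
    refine ⟨by omega, by omega, by omega, by omega, ?_⟩
    have ha : a.toNat = i := by omega
    have hb : b.toNat = j := by omega
    rw [ha, hb]; exact hhash
  · rintro ⟨ha0, han, hb0, hbw, hhash⟩
    refine ⟨a.toNat, by simp only [List.mem_range]; omega, ?_⟩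
    rw [mem_pvRow]
    exact ⟨b.toNat, by omega, by ext <;> simp <;> omega, hhash⟩

theorem mem_pvShift (cells : PySem.Set (Int × Int)) (d : Int × Int) (q : Int × Int) :
    q ∈ pvShift cells d ↔ (q.1 + d.1, q.2 + d.2) ∈ cells := by
  simp only [pvShift, PySem.Set.mem_ofList, List.mem_map]
  constructor
  · rintro ⟨p, hp, rfl⟩
    simpa [show p.1 - d.1 + d.1 = p.1 by ring, show p.2 - d.2 + d.2 = p.2 by ring] using hp
  · intro h
    exact ⟨(q.1 + d.1, q.2 + d.2), h, by simp⟩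

theorem mem_foldl_inter (cells : PySem.Set (Int × Int)) :
    ∀ (ds : List (Int × Int)) (a0 : PySem.Set (Int × Int)) (q : Int × Int),
    q ∈ ds.foldl (fun a d => PySem.Set.inter a (pvShift cells d)) a0 ↔
      q ∈ a0 ∧ ∀ d ∈ ds, (q.1 + d.1, q.2 + d.2) ∈ cells := by
  intro ds
  induction ds with
  | nil => intro a0 q; simp
  | cons d ds ih =>
    intro a0 q
    rw [List.foldl_cons, ih, PySem.Set.mem_inter, mem_pvShift]
    constructor
    · rintro ⟨⟨h0, hd⟩, hall⟩
      exact ⟨h0, fun d' hd' => by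
        rcases List.mem_cons.mp hd' with rfl | hd' 
        · exact hd
        · exact hall d' hd'⟩
    · rintro ⟨h0, hall⟩
      exact ⟨⟨h0, hall d (List.mem_cons_self ..)⟩, fun d' hd' => hall d' (List.mem_cons_of_mem _ hd')⟩

theorem nodup_foldl_inter (cells : PySem.Set (Int × Int)) :
    ∀ (ds : List (Int × Int)) (a0 : PySem.Set (Int × Int)), a0.Nodup →
    (ds.foldl (fun a d => PySem.Set.inter a (pvShift cells d)) a0).Nodup := by
  intro ds
  induction ds with
  | nil => intro a0 h; simpa using h
  | cons d ds ih => intro a0 h; exact ih _ (PySem.Set.nodup_inter _ _ h)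

-- the bridge: the set-algebra anchor condition is exactly A's isSeaMonster test
theorem bridge (image : List (List String)) (q : Int × Int) :
    ((0 ≤ q.1 ∧ q.1 ≤ (image.length : Int) - 3 ∧ 0 ≤ q.2 ∧ q.2 ≤ ((image.getD 0 []).length : Int) - 20) ∧
      ∀ d ∈ pvMonster, (q.1 + d.1, q.2 + d.2) ∈ pvCells image)
    ↔ ∃ i < image.length, ∃ j < (image.getD 0 []).length,
        q = ((i : Int), (j : Int)) ∧ isSeaMonster i j image = true := by
  obtain ⟨qi, qj⟩ := q
  constructor
  · rintro ⟨⟨h1, h2, h3, h4⟩, hall⟩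
    have hallN : ∀ (dr dc : Nat), ((dr : Int), (dc : Int)) ∈ pvMonster →
        pvGet image (qi.toNat + dr) (qj.toNat + dc) = "#" := by
      intro dr dc hd
      have h := (mem_pvCells image (qi + dr) (qj + dc)).mp (hall _ hd)
      have e1 : (qi + (dr : Int)).toNat = qi.toNat + dr := by omega
      have e2 : (qj + (dc : Int)).toNat = qj.toNat + dc := by omega
      rw [e1, e2] at h
      exact beq_iff_eq.mp h.2.2.2.2
    have e01 : pvGet image qi.toNat (qj.toNat + 18) = "#" := by simpa using hallN 0 18 (by decide)
    have e02 : pvGet image (qi.toNat + 1) qj.toNat = "#" := by simpa using hallN 1 0 (by decide)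
    have e03 := hallN 1 5 (by decide)
    have e04 := hallN 1 6 (by decide)
    have e05 := hallN 1 11 (by decide)
    have e06 := hallN 1 12 (by decide)
    have e07 := hallN 1 17 (by decide)
    have e08 := hallN 1 18 (by decide)
    have e09 := hallN 1 19 (by decide)
    have e10 := hallN 2 1 (by decide)
    have e11 := hallN 2 4 (by decide)
    have e12 := hallN 2 7 (by decide)
    have e13 := hallN 2 10 (by decide)
    have e14 := hallN 2 13 (by decide)
    have e15 := hallN 2 16 (by decide)
    have hcond : ¬(qi.toNat ≥ image.length ∨ qj.toNat ≥ (image.getD 0 []).length ∨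
        qi.toNat + 2 ≥ image.length ∨ qj.toNat + 19 ≥ (image.getD 0 []).length) := by omega
    refine ⟨qi.toNat, by omega, qj.toNat, by omega, by ext <;> simp <;> omega, ?_⟩
    rw [isSeaMonster, if_neg hcond]
    simp [validSeaMonster, e01, e02, e03, e04, e05, e06, e07, e08, e09, e10, e11, e12, e13, e14, e15]
  · rintro ⟨i, hi, j, hj, hq, hm⟩
    have hqi : qi = (i : Int) := congrArg Prod.fst hq
    have hqj : qj = (j : Int) := congrArg Prod.snd hq
    subst hqi; subst hqj
    have hg : ¬(i ≥ image.length ∨ j ≥ (image.getD 0 []).length ∨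
        i + 2 ≥ image.length ∨ j + 19 ≥ (image.getD 0 []).length) := by
      intro h
      rw [isSeaMonster, if_pos h] at hm
      exact Bool.false_ne_true hm
    rw [isSeaMonster, if_neg hg] at hm
    simp only [validSeaMonster, Bool.and_eq_true, beq_iff_eq] at hm
    obtain ⟨⟨⟨⟨⟨c1, ⟨c2, c3⟩, c4⟩, ⟨c5, c6⟩, c7⟩, ⟨c8, c9⟩, c10⟩, ⟨c11, c12⟩, c13⟩, c14, c15⟩ := hm
    have hgn : i + 2 < image.length := by omega
    have hgw : j + 19 < (image.getD 0 []).length := by omega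
    refine ⟨⟨by omega, by omega, by omega, by omega⟩, ?_⟩
    have hmemN : ∀ (dr dc : Nat), dr ≤ 2 → dc ≤ 19 →
        pvGet image (i + dr) (j + dc) = "#" →
        ((i : Int) + (dr : Int), (j : Int) + (dc : Int)) ∈ pvCells image := by
      intro dr dc h2 h19 hpv
      rw [mem_pvCells]
      have e1 : ((i : Int) + (dr : Int)).toNat = i + dr := by omega
      have e2 : ((j : Int) + (dc : Int)).toNat = j + dc := by omega
      rw [e1, e2]
      exact ⟨by omega, by omega, by omega, by omega, beq_iff_eq.mpr hpv⟩
    intro d hd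
    simp only [pvMonster, List.mem_cons, List.not_mem_nil, or_false] at hd
    rcases hd with rfl | rfl | rfl | rfl | rfl | rfl | rfl | rfl | rfl | rfl | rfl | rfl | rfl | rfl | rfl
    · exact_mod_cast hmemN 0 18 (by norm_num) (by norm_num) (by simpa using c1)
    · exact_mod_cast hmemN 1 0 (by norm_num) (by norm_num) (by simpa using c2)
    · exact_mod_cast hmemN 1 5 (by norm_num) (by norm_num) (by simpa using c3)
    · exact_mod_cast hmemN 1 6 (by norm_num) (by norm_num) (by simpa using c4)
    · exact_mod_cast hmemN 1 11 (by norm_num) (by norm_num) (by simpa using c5)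
    · exact_mod_cast hmemN 1 12 (by norm_num) (by norm_num) (by simpa using c6)
    · exact_mod_cast hmemN 1 17 (by norm_num) (by norm_num) (by simpa using c7)
    · exact_mod_cast hmemN 1 18 (by norm_num) (by norm_num) (by simpa using c8)
    · exact_mod_cast hmemN 1 19 (by norm_num) (by norm_num) (by simpa using c9)
    · exact_mod_cast hmemN 2 1 (by norm_num) (by norm_num) (by simpa using c10)
    · exact_mod_cast hmemN 2 4 (by norm_num) (by norm_num) (by simpa using c11)
    · exact_mod_cast hmemN 2 7 (by norm_num) (by norm_num) (by simpa using c12)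
    · exact_mod_cast hmemN 2 10 (by norm_num) (by norm_num) (by simpa using c13)
    · exact_mod_cast hmemN 2 13 (by norm_num) (by norm_num) (by simpa using c14)
    · exact_mod_cast hmemN 2 16 (by norm_num) (by norm_num) (by simpa using c15)

theorem natCast_listSum (l : List Nat) : ((l.sum : Nat) : Int) = (l.map (fun (x : Nat) => (x : Int))).sum := by
  induction l with
  | nil => simp
  | cons x t ih => simp [ih]

-- flatMaps of tagged rows over distinct row indices have no duplicates
theorem nodup_gridFlat (n w : Nat) (p : Nat → Nat → Bool) :
    ((List.range n).flatMap (fun i =>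
      ((List.range w).filter (p i)).map (fun (j : Nat) => ((i : Int), (j : Int))))).Nodup := by
  induction n with
  | zero => simp
  | succ n ih =>
    rw [List.range_succ, List.flatMap_append]
    refine List.Nodup.append ih ?_ ?_
    · simp only [List.flatMap_cons, List.flatMap_nil, List.append_nil]
      refine List.Nodup.map ?_ (List.Nodup.filter _ List.nodup_range)
      intro a b h
      simpa using congrArg Prod.snd h
    · intro x hx hx'
      simp only [List.mem_flatMap, List.mem_map, List.mem_range] at hx
      simp only [List.flatMap_cons, List.flatMap_nil, List.append_nil, List.mem_map] at hx'
      rcases hx with ⟨i, hi, j, _, rfl⟩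
      rcases hx' with ⟨j', _, hj'⟩
      have : (n : Int) = (i : Int) := by simpa using congrArg Prod.fst hj'
      omega

theorem roughness_spec' (image : List (List String)) : roughness image = roughness_alt image := by
  -- shape A's two double loops into sums of per-row counts
  have hInnerHash : (fun (h : Int) (i : Nat) =>
      (List.range (image.getD 0 []).length).foldl (fun h j =>
        if pvGet image i j == "#" then h + 1 else h) h)
      = fun (h : Int) (i : Nat) =>
        h + (((List.range (image.getD 0 []).length).countP (fun j => pvGet image i j == "#")) : Int) := by
    funext h i; exact PySem.List.foldl_if_add_one _ _ _
  have hInnerMon : (fun (c : Int) (i : Nat) =>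
      (List.range (image.getD 0 []).length).foldl (fun c j =>
        if isSeaMonster i j image then c + 1 else c) c)
      = fun (c : Int) (i : Nat) =>
        c + (((List.range (image.getD 0 []).length).countP (fun j => isSeaMonster i j image)) : Int) := by
    funext c i; exact PySem.List.foldl_if_add_one _ _ _
  -- the '#' count of A equals the size of B's point set
  have hLen : (pvCells image).length
      = ((List.range image.length).map (fun i =>
          (List.range (image.getD 0 []).length).countP (fun j => pvGet image i j == "#"))).sum := by
    rw [pvCells_eq, List.length_flatMap]
    congr 1
    refine List.map_congr_left ?_
    intro i _
    simp [pvRow, List.countP_eq_length_filter]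
  -- B's anchors: membership and nodup
  have hAnchMem : ∀ q : Int × Int,
      q ∈ (pvMonster.drop 1).foldl (fun a d => PySem.Set.inter a (pvShift (pvCells image) d))
            (pvShift (pvCells image) (pvMonster.headD (0, 0))) ↔
        ∀ d ∈ pvMonster, (q.1 + d.1, q.2 + d.2) ∈ pvCells image := by
    intro q
    rw [mem_foldl_inter, mem_pvShift]
    conv_rhs => rw [show pvMonster = ((0 : Int), (18 : Int)) :: pvMonster.drop 1 from rfl,
      List.forall_mem_cons]
    rfl
  have hAnchNodup : ((pvMonster.drop 1).foldl (fun a d => PySem.Set.inter a (pvShift (pvCells image) d))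
      (pvShift (pvCells image) (pvMonster.headD (0, 0)))).Nodup :=
    nodup_foldl_inter _ _ _ (PySem.Set.nodup_ofList _)
  -- the filtered anchors are a permutation of A's accepted (i, j) grid points
  have hPerm : ((pvMonster.drop 1).foldl (fun a d => PySem.Set.inter a (pvShift (pvCells image) d))
        (pvShift (pvCells image) (pvMonster.headD (0, 0)))).filter
          (fun p => decide (0 ≤ p.1 ∧ p.1 ≤ (image.length : Int) - 3 ∧ 0 ≤ p.2 ∧
            p.2 ≤ ((image.getD 0 []).length : Int) - 20))
      |>.Perm ((List.range image.length).flatMap (fun i =>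
          ((List.range (image.getD 0 []).length).filter (fun j => isSeaMonster i j image)).map
            (fun (j : Nat) => ((i : Int), (j : Int))))) := by
    rw [List.perm_ext_iff_of_nodup (List.Nodup.filter _ hAnchNodup)
      (nodup_gridFlat _ _ (fun i j => isSeaMonster i j image))]
    intro q
    rw [List.mem_filter, hAnchMem q, decide_eq_true_iff]
    rw [and_comm, bridge image q]
    constructor
    · rintro ⟨i, hi, j, hj, rfl, hm⟩
      simp only [List.mem_flatMap, List.mem_map, List.mem_filter, List.mem_range]
      exact ⟨i, hi, j, ⟨hj, hm⟩, rfl⟩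
    · intro hq
      simp only [List.mem_flatMap, List.mem_map, List.mem_filter, List.mem_range] at hq
      rcases hq with ⟨i, hi, j, ⟨hj, hm⟩, rfl⟩
      exact ⟨i, hi, j, hj, rfl, hm⟩
  -- the grid list of accepted points has A's monster count as its length
  have hFlatLen : ((List.range image.length).flatMap (fun i =>
        ((List.range (image.getD 0 []).length).filter (fun j => isSeaMonster i j image)).map
          (fun (j : Nat) => ((i : Int), (j : Int))))).length
      = ((List.range image.length).map (fun i =>
          (List.range (image.getD 0 []).length).countP (fun j => isSeaMonster i j image))).sum := by
    rw [List.length_flatMap]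
    congr 1
    refine List.map_congr_left ?_
    intro i _
    simp [List.countP_eq_length_filter]
  -- assemble
  simp only [roughness, roughness_alt, numSeaMonsters]
  rw [hInnerHash, hInnerMon, PySem.List.foldl_add, PySem.List.foldl_add,
    PySem.List.foldl_ite_add_one]
  rw [List.countP_eq_length_filter, hPerm.length_eq, hFlatLen]
  have hlen2 : PySem.Set.len (pvCells image) = (pvCells image).length := rfl
  rw [hlen2, hLen]
  rw [natCast_listSum, natCast_listSum, List.map_map, List.map_map]
  simp only [Function.comp_def, zero_add]

-- ===== VERDICT (by name: the statement is the Claim_ definition above) =====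
theorem roughness_spec : Claim_equal_roughness := by
  intro image _ _
  exact roughness_spec' image
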